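-- pv_equiv track=rewrite | github.com/ankul-in/Two-years | KATA141.py | is_centered
-- ===== SOURCE A (Python) =====
-- def is_centered(xs: list[int], n: int) -> bool:
--     for i in range(((len(xs)+1)//2)):
--         sublist=xs[i:len(xs)-i]
--         sumsub = sum(sublist)
--         if sumsub == n:
--             return True
--     if len(xs) % 2 == 0:
--         return 0 == n
--     return False
-- ===== SOURCE B (Python) =====
-- def is_centered(xs: list[int], n: int) -> bool:
--     # Build prefix sums once; each centered-sublist sum is pre[m-i] - pre[i], so every check is O(1).
--     pre = [0]
--     s = 0
--     for x in xs:
--         s += x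
--         pre.append(s)
--     m = len(xs)
--     if any(pre[m - i] - pre[i] == n for i in range((m + 1) // 2)):
--         return True
--     return m % 2 == 0 and n == 0
-- ===== Notes on version B (the rewrite author's own statement) =====
-- stated objective: faster
-- what changed: B builds a prefix-sum table in one pass and tests each centered sublist as a prefix difference pre[m-i]-pre[i] via any(), instead of re-summing each slice.
import Mathlib
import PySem

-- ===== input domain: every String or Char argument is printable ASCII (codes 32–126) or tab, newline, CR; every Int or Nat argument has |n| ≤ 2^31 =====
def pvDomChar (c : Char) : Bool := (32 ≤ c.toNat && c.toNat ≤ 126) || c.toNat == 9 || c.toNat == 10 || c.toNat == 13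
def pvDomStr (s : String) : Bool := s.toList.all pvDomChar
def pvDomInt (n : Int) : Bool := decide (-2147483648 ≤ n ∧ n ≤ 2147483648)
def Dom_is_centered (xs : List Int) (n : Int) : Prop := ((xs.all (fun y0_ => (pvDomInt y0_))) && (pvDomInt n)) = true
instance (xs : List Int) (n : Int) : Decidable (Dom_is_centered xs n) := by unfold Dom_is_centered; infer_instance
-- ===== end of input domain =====

-- B builds a prefix-sum table once and tests each centered sublist as pre[m-i] - pre[i]; objective: faster.

-- ===== PORT A =====
-- 'for i in range((len(xs)+1)//2): … return True / fall through' as recursion over the index list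
def isCenteredLoopA (xs : List Int) (n : Int) : List Int → Bool
  | [] => if xs.length % 2 = 0 then decide ((0:Int) = n) else false
  | i :: rest =>
    let sublist := PySem.List.slice xs (some i) (some ((xs.length : Int) - i))
    if sublist.sum = n then true else isCenteredLoopA xs n rest

def is_centered (xs : List Int) (n : Int) : Bool :=
  isCenteredLoopA xs n (PySem.List.pyRange 0 (PySem.Int.floordiv ((xs.length : Int) + 1) 2) 1)

-- ===== PORT B =====
-- 'pre = [0]; for x in xs: s += x; pre.append(s)' as a foldl carrying (pre, s);
-- the indices m-i and i are always in range, so List.getD _ _ 0 is exact for pre[m-i] / pre[i]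
def prefixSumsB (xs : List Int) : List Int × Int :=
  xs.foldl (fun (p : List Int × Int) x => (p.1 ++ [p.2 + x], p.2 + x)) ([0], 0)

def is_centered_alt (xs : List Int) (n : Int) : Bool :=
  let pre := (prefixSumsB xs).1
  let m := xs.length
  if (List.range ((m + 1) / 2)).any (fun i => pre.getD (m - i) 0 - pre.getD i 0 == n)
  then true
  else (m % 2 == 0) && (n == 0)

-- ===== PRECONDITION & SPEC =====
def Spec_is_centered (xs : List Int) (n : Int) (out : Bool) : Prop := out = is_centered_alt xs n
instance (xs : List Int) (n : Int) (out : Bool) : Decidable (Spec_is_centered xs n out) := by unfold Spec_is_centered; infer_instance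

-- ===== CLAIM (what is proved, stated in full; the proofs are below) =====
def Claim_equal_is_centered : Prop := ∀ (xs : List Int) (n : Int), Dom_is_centered xs n → Spec_is_centered xs n (is_centered xs n)

-- ===== LEMMAS AND PROOFS =====

-- membership-restricted congruence for List.any
lemma any_congr_mem {α : Type} {l : List α} {p q : α → Bool}
    (h : ∀ a ∈ l, p a = q a) : l.any p = l.any q := by
  induction l with
  | nil => rfl
  | cons a t ih =>
    simp only [List.any_cons, h a (List.mem_cons_self), ih (fun x hx => h x (List.mem_cons_of_mem a hx))]

-- prefixSumsB builds exactly the table of prefix sums (and carries the total)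
lemma prefixSumsB_spec (xs : List Int) :
    prefixSumsB xs = ((List.range (xs.length + 1)).map (fun i => (xs.take i).sum), xs.sum) := by
  induction xs using List.reverseRecOn with
  | nil => simp [prefixSumsB]
  | append_singleton l a ih =>
    unfold prefixSumsB at ih ⊢
    rw [List.foldl_append, ih]
    simp only [List.foldl_cons, List.foldl_nil, List.length_append, List.length_singleton,
      Prod.mk.injEq]
    refine ⟨?_, by simp⟩
    have hr : List.range (l.length + 1 + 1) = List.range (l.length + 1) ++ [l.length + 1] :=
      List.range_succ
    rw [hr, List.map_append]
    congr 1
    · apply List.map_congr_left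
      intro i hi
      have : i ≤ l.length := by
        have := List.mem_range.mp hi; omega
      rw [List.take_append_of_le_length this]
    · have ht : (l ++ [a]).take (l.length + 1) = l ++ [a] := by
        apply List.take_of_length_le; simp
      simp [ht, List.sum_append]

lemma pre_getD (xs : List Int) (i : Nat) (h : i ≤ xs.length) :
    ((prefixSumsB xs).1).getD i 0 = (xs.take i).sum := by
  rw [prefixSumsB_spec]
  simp only [List.getD, List.getElem?_map, List.getElem?_range (by omega : i < xs.length + 1)]
  rfl

-- A's slice sum as a prefix difference
lemma sliceSum_pre (xs : List Int) (i : Nat) (h : 2 * i ≤ xs.length) :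
    (PySem.List.slice xs (some (i : Int)) (some ((xs.length : Int) - i))).sum
      = (xs.take (xs.length - i)).sum - (xs.take i).sum := by
  have hc : ((xs.length : Int) - i) = ((xs.length - i : Nat) : Int) := by omega
  rw [hc, PySem.List.slice_natCast]
  have h3 : xs.length - i - i = xs.length - 2 * i := by omega
  rw [h3]
  have h1 : xs.length - i = i + (xs.length - 2 * i) := by omega
  rw [h1, List.take_add, List.sum_append]
  ring

-- A's loop returns true at the first hit, else the fallthrough value: that is 'any || base'
lemma loopA_eq_any (xs : List Int) (n : Int) (L : List Int) :
    isCenteredLoopA xs n L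
      = (L.any (fun i =>
            (PySem.List.slice xs (some i) (some ((xs.length : Int) - i))).sum == n)
          || isCenteredLoopA xs n []) := by
  induction L with
  | nil => simp
  | cons i rest ih =>
    simp only [isCenteredLoopA, List.any_cons]
    by_cases hs :
        (PySem.List.slice xs (some i) (some ((xs.length : Int) - i))).sum = n
    · simp [hs]
    · have hb : ((PySem.List.slice xs (some i) (some ((xs.length : Int) - i))).sum == n) = false := by
        simp [hs]
      rw [if_neg hs, ih, hb, Bool.false_or]
      rfl

lemma base_eq (xs : List Int) (n : Int) :
    isCenteredLoopA xs n [] = ((xs.length % 2 == 0) && (n == 0)) := by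
  simp only [isCenteredLoopA]
  by_cases hn : n = 0
  · subst hn; by_cases hm : xs.length % 2 = 0 <;> simp [hm]
  · by_cases hm : xs.length % 2 = 0 <;> simp [hm, hn, Ne.symm hn]

-- ===== VERDICT (by name: the statement is the Claim_ definition above) =====
theorem is_centered_spec : Claim_equal_is_centered := by
  intro xs n _
  unfold Spec_is_centered is_centered is_centered_alt
  have hk : PySem.Int.floordiv ((xs.length : Int) + 1) 2 = (((xs.length + 1) / 2 : Nat) : Int) := by
    exact_mod_cast PySem.Int.floordiv_natCast (xs.length + 1) 2
  rw [hk, loopA_eq_any, base_eq, PySem.List.pyRange_one]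
  have hto : ((((xs.length + 1) / 2 : Nat) : Int) - 0).toNat = (xs.length + 1) / 2 := by omega
  rw [hto, List.any_map]
  have hany : (List.range ((xs.length + 1) / 2)).any
        ((fun i => (PySem.List.slice xs (some i) (some ((xs.length : Int) - i))).sum == n)
          ∘ (fun k : Nat => (0 : Int) + k))
      = (List.range ((xs.length + 1) / 2)).any
          (fun i => ((prefixSumsB xs).1.getD (xs.length - i) 0
                      - (prefixSumsB xs).1.getD i 0) == n) := by
    apply any_congr_mem
    intro i hi
    have hi' : i < (xs.length + 1) / 2 := List.mem_range.mp hi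
    have h2 : 2 * i ≤ xs.length := by omega
    simp only [Function.comp, zero_add]
    rw [sliceSum_pre xs i h2, pre_getD xs (xs.length - i) (by omega), pre_getD xs i (by omega)]
  rw [hany]
  cases hb : (List.range ((xs.length + 1) / 2)).any
      (fun i => ((prefixSumsB xs).1.getD (xs.length - i) 0
                  - (prefixSumsB xs).1.getD i 0) == n) <;>
    simp only [hb, Bool.false_or, Bool.true_or, if_true, if_false, Bool.false_eq_true]
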